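-- pv_equiv track=rewrite | github.com/cp4011/Algorithms | Examination/16_小Q的歌单.py | func
-- ===== SOURCE A (Python) =====
-- def func(a, x, b, y, k):
--     def num_comb(p, q):
--         s1, s2 = 1, 1
--         for i in range(p-q+1, p+1):
--             s1 *= i
--         for j in range(1, q+1):
--             s2 *= j
--         return s1 // s2
--     l1, l2 = [], []
--     temp = []
--     for i in range(1, x+1):
--         l1.append(a*i)
--     for j in range(1, y+1):
--         l2.append(b*j)
--     for i in l1:
--         for j in l2:
--             if i+j == k:
--                 temp.append([i, j])
--     ans = 0
--     for i in temp:
--         n = i[0] // a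
--         m = i[1] // b
--         ans += num_comb(x, n) * num_comb(y, m)
--     return ans % 1000000007
-- ===== SOURCE B (Python) =====
-- def func(a, x, b, y, k):
--     MOD = 1000000007
--
--     def comb(p, q):
--         c = 1
--         for i in range(q):
--             c = c * (p - i) // (i + 1)
--         return c
--
--     ans = 0
--     for n in range(1, x + 1):
--         r = k - a * n
--         if r % b == 0:
--             m = r // b
--             if 1 <= m <= y:
--                 ans += comb(x, n) * comb(y, m)
--     return ans % MOD
-- ===== Notes on version B (the rewrite author's own statement) =====
-- stated objective: faster
-- what changed: Instead of materialising both duration lists and scanning all x*y pairs, B loops once over n=1..x and solves b*m = k-a*n directly by a divisibility and range check, computing each binomial coefficient with the incremental multiplicative formula instead of two full products and one big division.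
-- outside the precondition, e.g. on func(0, 2, 3, 1, 5): A returns 0, B returns 0; on func(1, 2, 0, 3, 5): A returns 0, B raises ZeroDivisionError
import Mathlib
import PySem

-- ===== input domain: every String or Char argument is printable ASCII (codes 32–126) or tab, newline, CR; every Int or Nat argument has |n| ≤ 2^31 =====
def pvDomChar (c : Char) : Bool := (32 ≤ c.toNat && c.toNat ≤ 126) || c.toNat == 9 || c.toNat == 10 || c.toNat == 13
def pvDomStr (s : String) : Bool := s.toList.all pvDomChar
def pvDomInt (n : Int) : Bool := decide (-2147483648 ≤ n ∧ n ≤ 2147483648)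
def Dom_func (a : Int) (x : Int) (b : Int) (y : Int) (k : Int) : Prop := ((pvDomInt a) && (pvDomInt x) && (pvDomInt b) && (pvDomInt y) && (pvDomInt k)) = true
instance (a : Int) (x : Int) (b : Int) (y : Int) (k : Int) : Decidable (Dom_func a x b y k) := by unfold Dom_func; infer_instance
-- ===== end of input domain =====

-- B replaces A's O(x*y) scan over all duration pairs by a single O(x) loop solving
-- b*m = k - a*n by a divisibility and range check, with incrementally computed binomials.

-- ===== PORT A =====
def numComb (p : Int) (q : Int) : Int :=
  let s1 := (PySem.List.pyRange (p - q + 1) (p + 1) 1).foldl (fun s i => s * i) 1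
  let s2 := (PySem.List.pyRange 1 (q + 1) 1).foldl (fun s j => s * j) 1
  PySem.Int.floordiv s1 s2

def func (a : Int) (x : Int) (b : Int) (y : Int) (k : Int) : Int :=
  -- '.append' loops encoded as reverse-cons (O(1) per append; same list as acc ++ [v])
  let l1 := ((PySem.List.pyRange 1 (x + 1) 1).foldl (fun acc i => (a * i) :: acc) []).reverse
  let l2 := ((PySem.List.pyRange 1 (y + 1) 1).foldl (fun acc j => (b * j) :: acc) []).reverse
  let temp := l1.foldl (fun acc i =>
    l2.foldl (fun acc2 j => if i + j = k then acc2 ++ [(i, j)] else acc2) acc) []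
  let ans := temp.foldl (fun acc pr =>
    acc + numComb x (PySem.Int.floordiv pr.1 a) * numComb y (PySem.Int.floordiv pr.2 b)) 0
  PySem.Int.mod ans 1000000007

-- ===== PORT B =====
def combB (p : Int) (q : Int) : Int :=
  (PySem.List.pyRange 0 q 1).foldl (fun c i => PySem.Int.floordiv (c * (p - i)) (i + 1)) 1

def func_alt (a : Int) (x : Int) (b : Int) (y : Int) (k : Int) : Int :=
  let ans := (PySem.List.pyRange 1 (x + 1) 1).foldl (fun ans n =>
    let r := k - a * n
    if PySem.Int.mod r b = 0 then
      let m := PySem.Int.floordiv r b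
      if 1 ≤ m ∧ m ≤ y then ans + combB x n * combB y m else ans
    else ans) 0
  PySem.Int.mod ans 1000000007

-- ===== PRECONDITION & SPEC =====
-- Pre_ excludes a = 0 or b = 0: there A's n = i//a (resp. m = j//b) raises ZeroDivisionError
-- whenever any duration pair matches; the whole slice is excluded (A still returns 0 on the
-- no-match part of it), since the exact raise condition is not closed-form on the input.
def Pre_func (a : Int) (x : Int) (b : Int) (y : Int) (k : Int) : Prop := a ≠ 0 ∧ b ≠ 0
instance (a : Int) (x : Int) (b : Int) (y : Int) (k : Int) : Decidable (Pre_func a x b y k) := by unfold Pre_func; infer_instance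
def pvWitness_func : Int × Int × Int × Int × Int := (2, 3, 3, 4, 8)

def Spec_func (a : Int) (x : Int) (b : Int) (y : Int) (k : Int) (out : Int) : Prop := out = func_alt a x b y k
instance (a : Int) (x : Int) (b : Int) (y : Int) (k : Int) (out : Int) : Decidable (Spec_func a x b y k out) := by unfold Spec_func; infer_instance

-- ===== CLAIM (what is proved, stated in full; the proofs are below) =====
def Claim_equal_func : Prop := ∀ (a : Int) (x : Int) (b : Int) (y : Int) (k : Int), Dom_func a x b y k → Pre_func a x b y k → Spec_func a x b y k (func a x b y k)

-- ===== LEMMAS AND PROOFS =====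

-- reverse-cons list building is mapping
theorem foldl_cons_rev {α β : Type} (L : List α) (f : α → β) (acc : List β) :
    L.foldl (fun acc i => f i :: acc) acc = (L.map f).reverse ++ acc := by
  induction L generalizing acc with
  | nil => simp
  | cons a l ih => simp [ih]

-- folding (·*·) from any seed factors the seed out
theorem foldl_mul_init (l : List Int) (c : Int) :
    l.foldl (fun s i => s * i) c = c * l.foldl (fun s i => s * i) 1 := by
  induction l generalizing c with
  | nil => simp
  | cons a l ih => simp only [List.foldl_cons]; rw [ih (c*a), ih (1*a)]; ring

-- A's denominator loop computes Q!
theorem s2_nat (Q : Nat) :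
    (PySem.List.pyRange 1 ((Q : Int) + 1) 1).foldl (fun s j => s * j) 1 = (Q.factorial : Int) := by
  induction Q with
  | zero => simp [PySem.List.pyRange_one_eq_nil]
  | succ Q ih =>
      have h : (((Q + 1 : Nat) : Int) + 1) = ((Q : Int) + 1) + 1 := by push_cast; ring
      rw [h, PySem.List.pyRange_one_succ_right (by omega), List.foldl_append]
      simp only [List.foldl_cons, List.foldl_nil]
      rw [foldl_mul_init _ _, ih]
      push_cast [Nat.factorial_succ]; ring

-- A's numerator loop computes the descending factorial
theorem s1_nat (P Q : Nat) (h : Q ≤ P) :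
    (PySem.List.pyRange ((P : Int) - Q + 1) ((P : Int) + 1) 1).foldl (fun s i => s * i) 1
      = (P.descFactorial Q : Int) := by
  induction Q with
  | zero => simp [PySem.List.pyRange_one_eq_nil]
  | succ Q ih =>
      have hQ : Q ≤ P := Nat.le_of_succ_le h
      have h1 : (P : Int) - ((Q + 1 : Nat) : Int) + 1 = (P : Int) - Q := by push_cast; ring
      rw [h1, PySem.List.pyRange_one_cons (by omega)]
      simp only [List.foldl_cons]
      rw [foldl_mul_init, ih hQ, Nat.descFactorial_succ]
      have : ((P - Q : Nat) : Int) = (P : Int) - Q := by omega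
      push_cast [← this]; ring

-- B's incremental comb equals the binomial coefficient
theorem combB_nat (P Q : Nat) (h : Q ≤ P) : combB (P : Int) (Q : Int) = (P.choose Q : Int) := by
  unfold combB
  induction Q with
  | zero => simp [PySem.List.pyRange_one_eq_nil]
  | succ Q ih =>
      have hQ : Q ≤ P := Nat.le_of_succ_le h
      have h1 : ((Q + 1 : Nat) : Int) = (Q : Int) + 1 := by push_cast; ring
      rw [h1, PySem.List.pyRange_one_succ_right (by omega), List.foldl_append, ih hQ]
      simp only [List.foldl_cons, List.foldl_nil]
      have h2 : ((P.choose Q : Nat) : Int) * ((P : Int) - Q) = ((P.choose Q * (P - Q) : Nat) : Int) := by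
        push_cast [Nat.cast_sub hQ]; ring
      rw [h2]
      have h3 : ((Q : Int) + 1) = ((Q + 1 : Nat) : Int) := by push_cast; ring
      rw [h3, PySem.Int.floordiv_natCast]
      norm_cast
      rw [← Nat.choose_succ_right_eq, Nat.mul_div_cancel _ (Nat.succ_pos Q)]

-- A's num_comb equals the binomial coefficient
theorem numComb_nat (P Q : Nat) (h : Q ≤ P) : numComb (P : Int) (Q : Int) = (P.choose Q : Int) := by
  unfold numComb
  rw [s1_nat P Q h, s2_nat Q, PySem.Int.floordiv_natCast]
  norm_cast
  exact (Nat.choose_eq_descFactorial_div_factorial P Q).symm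

theorem comb_eq (p q : Int) (h0 : 0 ≤ q) (h1 : q ≤ p) : numComb p q = combB p q := by
  have hp : 0 ≤ p := le_trans h0 h1
  have e1 : p = ((p.toNat : Nat) : Int) := (Int.toNat_of_nonneg hp).symm
  have e2 : q = ((q.toNat : Nat) : Int) := (Int.toNat_of_nonneg h0).symm
  have hle : q.toNat ≤ p.toNat := by omega
  rw [e1, e2, numComb_nat _ _ hle, combB_nat _ _ hle]

-- Python's exact floor division b*m // b = m (b ≠ 0)
theorem fd_mul_cancel (b m : Int) (hb : b ≠ 0) : PySem.Int.floordiv (b * m) b = m := by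
  have h1 : PySem.Int.mod (b * m) b = 0 := (PySem.Int.mod_eq_zero_iff_dvd _ _).2 ⟨m, rfl⟩
  have h2 := PySem.Int.floordiv_mul_add_mod (b * m) b
  rw [h1, add_zero] at h2
  exact mul_right_cancel₀ hb (h2.trans (mul_comm b m))

theorem sum_flatMap_int {α : Type} (l : List α) (f : α → List Int) :
    (l.flatMap f).sum = (l.map (fun x => (f x).sum)).sum := by
  induction l with
  | nil => simp
  | cons a l ih => simp [List.flatMap_cons, ih]

-- B's guarded accumulating loop as a sum of conditional terms
theorem foldl_guard_add (L : List Int) (init : Int) (c : Int → Prop) [DecidablePred c]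
    (d : Int → Prop) [DecidablePred d] (t : Int → Int) :
    L.foldl (fun s n => if c n then (if d n then s + t n else s) else s) init
      = init + (L.map (fun n => if c n ∧ d n then t n else 0)).sum := by
  induction L generalizing init with
  | nil => simp
  | cons a l ih =>
      simp only [List.foldl_cons, List.map_cons, List.sum_cons]
      rw [ih]
      by_cases h1 : c a <;> by_cases h2 : d a <;> simp [h1, h2] <;> ring

-- on a duplicate-free list, summing over the elements equal to q0 picks at most one term
theorem sum_filter_single (L : List Int) (hL : L.Nodup) (q0 : Int) (t : Int → Int) :
    ((L.filter (fun m => decide (m = q0))).map t).sum = if q0 ∈ L then t q0 else 0 := by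
  induction L with
  | nil => simp
  | cons a l ih =>
      have hnd := hL
      rw [List.nodup_cons] at hnd
      by_cases h : a = q0
      · subst h
        have hfil : l.filter (fun m => decide (m = a)) = [] := by
          apply List.filter_eq_nil_iff.2
          intro m hm
          simp only [decide_eq_true_eq]
          intro he; exact hnd.1 (he ▸ hm)
        simp [hfil]
      · simp only [List.filter_cons, decide_eq_true_eq, if_neg h, List.mem_cons]
        rw [ih hnd.2]
        simp [Ne.symm h]

theorem main_eq (a x b y k : Int) (ha : a ≠ 0) (hb : b ≠ 0) :
    func a x b y k = func_alt a x b y k := by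
  unfold func func_alt
  simp only [foldl_cons_rev, List.append_nil, List.reverse_reverse, List.nil_append,
    PySem.List.foldl_append_ite, PySem.List.foldl_append_eq_flatMap,
    PySem.List.foldl_add]
  rw [foldl_guard_add _ _ (fun n => PySem.Int.mod (k - a * n) b = 0)
    (fun n => 1 ≤ PySem.Int.floordiv (k - a * n) b ∧ PySem.Int.floordiv (k - a * n) b ≤ y)
    (fun n => combB x n * combB y (PySem.Int.floordiv (k - a * n) b))]
  congr 1
  congr 1
  rw [List.map_flatMap, sum_flatMap_int, List.map_map]
  apply congrArg
  apply List.map_congr_left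
  intro n hn
  rw [PySem.List.mem_pyRange_one] at hn
  simp only [Function.comp]
  rw [List.filter_map, List.map_map]
  set r := k - a * n with hr
  by_cases hd : PySem.Int.mod r b = 0
  · -- b divides k - a*n: exactly one candidate m
    have hbq : b * PySem.Int.floordiv r b = r := by
      have h2 := PySem.Int.floordiv_mul_add_mod r b
      rw [hd, add_zero] at h2
      rw [mul_comm]; exact h2
    set q0 := PySem.Int.floordiv r b with hq0
    have hpred : (PySem.List.pyRange 1 (y + 1) 1).filter
        ((fun j => decide (a * n + j = k)) ∘ fun j => b * j)
        = (PySem.List.pyRange 1 (y + 1) 1).filter (fun m => decide (m = q0)) := by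
      apply List.filter_congr
      intro m hm
      simp only [Function.comp, decide_eq_decide]
      constructor
      · intro he
        have : b * m = b * q0 := by rw [hbq, hr]; omega
        exact mul_left_cancel₀ hb this
      · intro he; subst he; rw [hbq]; omega
    rw [hpred, List.map_map, sum_filter_single _ (PySem.List.nodup_pyRange_one _ _) q0]
    simp only [PySem.List.mem_pyRange_one]
    by_cases hq : 1 ≤ q0 ∧ q0 < y + 1
    · rw [if_pos hq, if_pos ⟨hd, hq.1, by omega⟩]
      simp only [Function.comp]
      rw [fd_mul_cancel a n ha, fd_mul_cancel b q0 hb]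
      rw [comb_eq x n (by omega) (by omega), comb_eq y q0 (by omega) (by omega)]
    · rw [if_neg hq, if_neg (by intro h; exact hq ⟨h.2.1, by omega⟩)]
  · -- b does not divide k - a*n: no pair matches for this n
    have hempty : (PySem.List.pyRange 1 (y + 1) 1).filter
        ((fun j => decide (a * n + j = k)) ∘ fun j => b * j) = [] := by
      apply List.filter_eq_nil_iff.2
      intro m hm
      simp only [Function.comp, decide_eq_true_eq]
      intro he
      apply hd
      rw [PySem.Int.mod_eq_zero_iff_dvd]
      exact ⟨m, by omega⟩
    rw [hempty, if_neg (by intro h; exact hd h.1)]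
    simp

-- ===== VERDICT (by name: the statement is the Claim_ definition above) =====
theorem func_spec : Claim_equal_func := by
  intro a x b y k _ hp
  unfold Spec_func
  exact main_eq a x b y k hp.1 hp.2
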